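-- pv_equiv track=rewrite | github.com/pHarith/AdventOfCode2024-Solutions | 14/day14sol.py | check_consecutive_ones
-- ===== SOURCE A (Python) =====
-- MIN_CONSECUTIVE_ONES = 7
--
-- def check_consecutive_ones(row):
--     max_consecutive = curr_consecutive = 0
--     for item in row:
--         if item == 1:
--             curr_consecutive += 1
--             max_consecutive = max(max_consecutive, curr_consecutive)
--         else:
--             # Reset our consecutive ones
--             curr_consecutive = 0
--     return max_consecutive >= MIN_CONSECUTIVE_ONES
-- ===== SOURCE B (Python) =====
-- MIN_CONSECUTIVE_ONES = 7
--
-- def check_consecutive_ones(row):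
--     # Fixed-pattern sliding-window search: the row has a long-enough run of
--     # ones iff some window of width w equals the all-ones pattern.
--     w = MIN_CONSECUTIVE_ONES
--     target = [1] * w
--     return any(row[i:i + w] == target for i in range(len(row) - w + 1))
-- ===== Notes on version B (the rewrite author's own statement) =====
-- stated objective: alternative
-- what changed: Replaced A's single-pass max/current run counter with a fixed-pattern sliding-window search: compare every length-7 window of the row against the all-ones pattern of width 7.
import Mathlib
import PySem

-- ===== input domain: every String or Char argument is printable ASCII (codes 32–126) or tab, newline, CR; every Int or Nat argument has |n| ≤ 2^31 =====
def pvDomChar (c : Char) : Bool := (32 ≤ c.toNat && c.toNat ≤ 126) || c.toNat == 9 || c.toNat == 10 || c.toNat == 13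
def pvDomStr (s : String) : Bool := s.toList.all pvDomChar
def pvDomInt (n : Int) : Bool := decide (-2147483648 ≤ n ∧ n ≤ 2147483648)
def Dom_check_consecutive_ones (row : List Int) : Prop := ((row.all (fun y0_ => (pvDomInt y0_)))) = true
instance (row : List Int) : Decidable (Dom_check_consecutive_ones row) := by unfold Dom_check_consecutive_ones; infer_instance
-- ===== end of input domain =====

-- B replaces A's max/current run-counter loop by a fixed-pattern sliding-window search
-- (compare each length-7 window with [1]*7); a different algorithm of the same cost.

-- ===== PORT A =====
def MIN_CONSECUTIVE_ONES : Int := 7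

-- the body of A's for-loop (one step of the accumulator update)
def pvStep (st : Int × Int) (item : Int) : Int × Int :=
  if item = 1 then (max st.1 (st.2 + 1), st.2 + 1) else (st.1, 0)

def check_consecutive_ones (row : List Int) : Bool :=
  -- max_consecutive = curr_consecutive = 0; for item in row: …
  let s := row.foldl pvStep (0, 0)
  decide (MIN_CONSECUTIVE_ONES ≤ s.1)

-- ===== PORT B =====
def check_consecutive_ones_alt (row : List Int) : Bool :=
  -- w = MIN_CONSECUTIVE_ONES; target = [1] * w
  let w : Int := MIN_CONSECUTIVE_ONES
  let target : List Int := List.replicate w.toNat 1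
  -- any(row[i:i+w] == target for i in range(len(row) - w + 1))
  (PySem.List.pyRange 0 ((row.length : Int) - w + 1) 1).any
    (fun i => PySem.List.slice row (some i) (some (i + w)) == target)

-- ===== PRECONDITION & SPEC =====
def Spec_check_consecutive_ones (row : List Int) (out : Bool) : Prop := out = check_consecutive_ones_alt row
instance (row : List Int) (out : Bool) : Decidable (Spec_check_consecutive_ones row out) := by unfold Spec_check_consecutive_ones; infer_instance

-- ===== CLAIM (what is proved, stated in full; the proofs are below) =====
def Claim_equal_check_consecutive_ones : Prop := ∀ (row : List Int), Dom_check_consecutive_ones row → Spec_check_consecutive_ones row (check_consecutive_ones row)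

-- ===== LEMMAS AND PROOFS =====

-- the pattern [1]*7
def pvRep : List Int := List.replicate 7 1

-- structural window predicate: some suffix starts with seven ones
def pvWb : List Int → Bool
  | [] => false
  | x :: xs => ((x :: xs).take 7 == pvRep) || pvWb xs

-- pvN l c = the final max-run value A's fold reaches starting from max 0 and current count c
def pvN : List Int → Int → Int
  | [], _ => 0
  | x :: xs, c => if x = 1 then max (c + 1) (pvN xs (c + 1)) else pvN xs 0

theorem pvN_nonneg (l : List Int) (c : Int) : 0 ≤ pvN l c := by
  induction l generalizing c with
  | nil => simp [pvN]
  | cons x xs ih =>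
      simp only [pvN]
      split_ifs
      · exact le_trans (ih (c + 1)) (le_max_right _ _)
      · exact ih 0

theorem pvFold_fst (l : List Int) : ∀ (m c : Int), 0 ≤ m →
    (l.foldl pvStep (m, c)).1 = max m (pvN l c) := by
  induction l with
  | nil => intro m c hm; simp [pvN, max_eq_left hm]
  | cons x xs ih =>
      intro m c hm
      rw [List.foldl_cons]
      by_cases hx : x = 1
      · rw [show pvStep (m, c) x = (max m (c + 1), c + 1) from by simp [pvStep, hx]]
        rw [ih (max m (c + 1)) (c + 1) (le_trans hm (le_max_left _ _))]
        rw [show pvN (x :: xs) c = max (c + 1) (pvN xs (c + 1)) from by simp [pvN, hx]]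
        rw [max_assoc]
      · rw [show pvStep (m, c) x = (m, 0) from by simp [pvStep, hx]]
        rw [ih m 0 hm]
        rw [show pvN (x :: xs) c = pvN xs 0 from by simp [pvN, hx]]

theorem pvPref_mono (l : List Int) (a b : Nat) (hba : b ≤ a)
    (h : l.take a = List.replicate a (1 : Int)) :
    l.take b = List.replicate b (1 : Int) := by
  have : l.take b = (l.take a).take b := by
    rw [List.take_take, Nat.min_eq_left hba]
  rw [this, h, List.take_replicate, Nat.min_eq_left hba]

theorem pvWb_of_take (l : List Int) (h : l.take 7 = pvRep) : pvWb l = true := by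
  cases l with
  | nil => simp [pvRep] at h
  | cons x xs => simp [pvWb, h]

-- main characterisation of A's accumulator
theorem pvMain (l : List Int) : ∀ (c : Nat),
    (7 ≤ pvN l (c : Int)) ↔
      (l.take ((7 - c) ⊔ 1) = List.replicate ((7 - c) ⊔ 1) (1 : Int) ∨ pvWb l = true) := by
  induction l with
  | nil =>
      intro c
      have hm : 1 ≤ (7 - c) ⊔ 1 := le_max_right _ _
      simp only [pvN, pvWb, List.take_nil]
      constructor
      · intro h; omega
      · rintro (h | h)
        · exact absurd h.symm (by simp [List.replicate_eq_nil_iff])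
        · simp at h
  | cons x xs ih =>
      intro c
      by_cases hx : x = 1
      · subst hx
        have hpv : pvN (1 :: xs) (c : Int) = max ((c : Int) + 1) (pvN xs ((c : Int) + 1)) := by
          simp [pvN]
        have hcast : ((c : Int) + 1) = ((c + 1 : Nat) : Int) := by push_cast; ring
        rw [hpv, le_max_iff, hcast, ih (c + 1)]
        by_cases hc : 6 ≤ c
        · have hm : (7 - c) ⊔ 1 = 1 := by omega
          constructor
          · intro _; left; simp [hm]
          · intro _; left; omega
        · have hm : (7 - c) ⊔ 1 = (7 - c) := by omega
          have hm' : (7 - (c + 1)) ⊔ 1 = 6 - c := by omega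
          have h7c : 7 - c = (6 - c) + 1 := by omega
          have hfalse : ¬ (7 ≤ (c : Int) + 1) := by
            intro h; omega
          have htake : ((1 : Int) :: xs).take ((7 - c) ⊔ 1)
              = List.replicate ((7 - c) ⊔ 1) (1 : Int)
              ↔ xs.take (6 - c) = List.replicate (6 - c) (1 : Int) := by
            rw [hm, h7c]
            simp [List.take_succ_cons, List.replicate_succ]
          have hWb : pvWb ((1 : Int) :: xs) = true
              ↔ (xs.take 6 = List.replicate 6 (1 : Int) ∨ pvWb xs = true) := by
            simp [pvWb, pvRep, List.take_succ_cons,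
              show (7 : Nat) = 6 + 1 from rfl, List.replicate_succ]
          rw [htake, hWb, hm']
          constructor
          · rintro (h | h | h)
            · exact absurd h hfalse
            · exact Or.inl h
            · exact Or.inr (Or.inr h)
          · rintro (h | h | h)
            · exact Or.inr (Or.inl h)
            · exact Or.inr (Or.inl (pvPref_mono xs 6 (6 - c) (by omega) h))
            · exact Or.inr (Or.inr h)
      · have hpv : pvN (x :: xs) (c : Int) = pvN xs ((0 : Nat) : Int) := by
          simp [pvN, hx]
        rw [hpv, ih 0]
        have hm : ∀ (n : Nat), 1 ≤ n →
            ¬ ((x :: xs).take n = List.replicate n (1 : Int)) := by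
          intro n hn h
          obtain ⟨k, rfl⟩ : ∃ k, n = k + 1 := ⟨n - 1, by omega⟩
          rw [List.take_succ_cons, List.replicate_succ] at h
          exact hx (List.cons_eq_cons.mp h).1
        have hWb : pvWb (x :: xs) = true ↔ pvWb xs = true := by
          simp only [pvWb, Bool.or_eq_true, beq_iff_eq]
          constructor
          · rintro (h | h)
            · exact absurd h (hm 7 (by omega))
            · exact h
          · exact Or.inr
        constructor
        · rintro (h | h)
          · exact Or.inr ((hWb.mpr) (pvWb_of_take xs (by simpa using h)))
          · exact Or.inr (hWb.mpr h)
        · rintro (h | h)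
          · exact absurd h (hm _ (le_max_right _ _))
          · exact Or.inr (hWb.mp h)

-- window form of pvWb
theorem pvWb_iff_exists (l : List Int) :
    pvWb l = true ↔ ∃ i : Nat, (l.drop i).take 7 = pvRep := by
  induction l with
  | nil =>
      simp [pvWb, pvRep]
  | cons x xs ih =>
      simp only [pvWb, Bool.or_eq_true, beq_iff_eq, ih]
      constructor
      · rintro (h | ⟨i, hi⟩)
        · exact ⟨0, by simpa using h⟩
        · exact ⟨i + 1, by simpa using hi⟩
      · rintro ⟨i, hi⟩
        cases i with
        | zero => exact Or.inl (by simpa using hi)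
        | succ j => exact Or.inr ⟨j, by simpa using hi⟩

theorem pvTake_rep_len (l : List Int) (i : Nat) (h : (l.drop i).take 7 = pvRep) :
    i + 7 ≤ l.length := by
  have := congrArg List.length h
  simp [pvRep] at this
  omega

-- B computes pvWb
theorem pvAlt_iff (l : List Int) :
    check_consecutive_ones_alt l = true ↔ ∃ i : Nat, (l.drop i).take 7 = pvRep := by
  rw [check_consecutive_ones_alt]
  rw [show MIN_CONSECUTIVE_ONES = (7 : Int) from rfl]
  rw [List.any_eq_true]
  constructor
  · rintro ⟨i, hmem, hslice⟩
    rw [PySem.List.mem_pyRange_one] at hmem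
    obtain ⟨j, rfl⟩ : ∃ j : Nat, i = (j : Int) := ⟨i.toNat, (Int.toNat_of_nonneg hmem.1).symm⟩
    rw [show ((j : Int) + 7) = ((j + 7 : Nat) : Int) by push_cast; ring,
        PySem.List.slice_natCast] at hslice
    exact ⟨j, by simpa [pvRep] using hslice⟩
  · rintro ⟨i, hi⟩
    have hlen := pvTake_rep_len l i hi
    refine ⟨(i : Int), ?_, ?_⟩
    · rw [PySem.List.mem_pyRange_one]
      exact ⟨Int.natCast_nonneg i, by omega⟩
    · rw [show ((i : Int) + 7) = ((i + 7 : Nat) : Int) by push_cast; ring,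
          PySem.List.slice_natCast]
      simpa [pvRep] using hi

theorem pvAlt_eq_Wb (l : List Int) : check_consecutive_ones_alt l = pvWb l := by
  rw [Bool.eq_iff_iff, pvAlt_iff, pvWb_iff_exists]

-- ===== VERDICT (by name: the statement is the Claim_ definition above) =====
theorem check_consecutive_ones_spec : Claim_equal_check_consecutive_ones := by
  intro row _
  unfold Spec_check_consecutive_ones
  have hA : check_consecutive_ones row = decide (7 ≤ pvN row 0) := by
    show decide (MIN_CONSECUTIVE_ONES ≤ (row.foldl pvStep (0, 0)).1) = _
    rw [show MIN_CONSECUTIVE_ONES = 7 from rfl, pvFold_fst row 0 0 le_rfl,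
      max_eq_right (pvN_nonneg row 0)]
  have hiff : (7 ≤ pvN row 0) ↔ (pvWb row = true) := by
    have := pvMain row 0
    simp only [Nat.cast_zero] at this
    rw [this]
    constructor
    · rintro (h | h)
      · exact pvWb_of_take row (by simpa [pvRep] using h)
      · exact h
    · exact Or.inr
  rw [hA, pvAlt_eq_Wb]
  rw [Bool.eq_iff_iff, decide_eq_true_iff]
  exact hiff
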